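-- pv_equiv track=rewrite | github.com/powergama/powergama | powergama/powergama/costbenefit.py | gamePayoffIsSymmetric
-- ===== SOURCE A (Python) =====
-- import itertools
--
-- def gamePayoffIsSymmetric(values, payoff_vector):
--     '''
--     Returns true if the resulting payoff vector possesses the symmetry property.
--     A payoff vector possesses the symmetry property if players with equal
--     marginal contribution receives the same payoff:
--     v(C \cup i) = v(C \cup j) for all
--     C \in 2^{\Omega} \setminus \{i,j\}, then x_i = x_j.
--     '''
--     sets = values.keys()
--     element = [i for i in sets if len(i) == 1]
--     for c1, c2 in itertools.combinations(element, 2):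
--         results = []
--         for m in sets:
--             junion = tuple(sorted(set(c1) | set(m)))
--             kunion = tuple(sorted(set(c2) | set(m)))
--             results.append(values[junion] == values[kunion])
--         if all(results) and payoff_vector[c1[0]] != payoff_vector[c2[0]]:
--             return False
--     return True
-- ===== SOURCE B (Python) =====
-- def gamePayoffIsSymmetric(values, payoff_vector):
--     '''
--     One pass: group players by their marginal-contribution signature; players
--     sharing a signature must share a payoff.
--     '''
--     sets = list(values.keys())
--     rep = {}
--     for c in sets:
--         if len(c) != 1:
--             continue
--         sig = tuple(values[tuple(sorted(set(c) | set(m)))] for m in sets)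
--         p = payoff_vector[c[0]]
--         if sig in rep:
--             if rep[sig] != p:
--                 return False
--         else:
--             rep[sig] = p
--     return True
-- ===== Notes on version B (the rewrite author's own statement) =====
-- stated objective: alternative
-- what changed: Replaces A's scan over all singleton pairs (recomputing both marginal-contribution vectors per pair) with one pass that computes each singleton's signature once and groups singletons in a dict keyed by signature, comparing each one's payoff against its group's representative.
-- outside the precondition, e.g. on gamePayoffIsSymmetric({(0,): 0, (5, 6): 1}, {0: 0}): A returns True, B raises KeyError; on gamePayoffIsSymmetric({(0,): 1}, {}): A returns True, B raises KeyError
import Mathlib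
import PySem

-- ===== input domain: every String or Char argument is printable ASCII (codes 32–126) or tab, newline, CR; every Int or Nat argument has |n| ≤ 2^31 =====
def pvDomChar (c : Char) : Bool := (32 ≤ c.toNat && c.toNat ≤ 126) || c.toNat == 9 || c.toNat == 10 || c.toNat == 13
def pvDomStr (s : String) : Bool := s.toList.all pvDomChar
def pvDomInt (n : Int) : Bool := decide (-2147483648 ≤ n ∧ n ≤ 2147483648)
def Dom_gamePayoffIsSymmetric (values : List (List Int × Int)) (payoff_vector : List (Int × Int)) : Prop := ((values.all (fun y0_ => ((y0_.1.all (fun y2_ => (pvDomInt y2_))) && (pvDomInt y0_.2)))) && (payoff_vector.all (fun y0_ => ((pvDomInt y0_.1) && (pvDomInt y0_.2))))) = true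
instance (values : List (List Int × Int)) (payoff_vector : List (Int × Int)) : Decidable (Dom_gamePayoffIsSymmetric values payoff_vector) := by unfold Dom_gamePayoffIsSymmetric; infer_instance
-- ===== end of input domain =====

-- B groups players by their marginal-contribution signature in one pass over a dict,
-- replacing A's pairwise rescans (objective: alternative algorithm).

-- ===== PORT A =====
-- tuple(sorted(set(c) | set(m)))   (shared by both ports: the values-dict key for c ∪ m)
def pvUnion (c m : List Int) : List Int :=
  PySem.List.sorted (PySem.Set.union (PySem.Set.ofList c) m) (fun x => x) false

-- c[0]; exact where it is used: every element c there has length 1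
def pvKey (c : List Int) : Int := (PySem.List.pyGet? c 0).getD 0

-- 'all(results) and payoff_vector[c1[0]] != payoff_vector[c2[0]]' for one pair
def pvA_badPair (d : PySem.Dict (List Int) Int) (pd : PySem.Dict Int Int)
    (sets : List (List Int)) (c1 c2 : List Int) : Bool :=
  let results := sets.map (fun m => d.get? (pvUnion c1 m) == d.get? (pvUnion c2 m))
  results.all (fun r => r) && !(pd.get? (pvKey c1) == pd.get? (pvKey c2))

-- inner part of 'for c1, c2 in itertools.combinations(element, 2)': c2 runs over rest
def pvA_inner (d : PySem.Dict (List Int) Int) (pd : PySem.Dict Int Int)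
    (sets : List (List Int)) (c1 : List Int) : List (List Int) → Bool
  | [] => true
  | c2 :: rest => if pvA_badPair d pd sets c1 c2 then false else pvA_inner d pd sets c1 rest

def pvA_outer (d : PySem.Dict (List Int) Int) (pd : PySem.Dict Int Int)
    (sets : List (List Int)) : List (List Int) → Bool
  | [] => true
  | c1 :: rest => if pvA_inner d pd sets c1 rest then pvA_outer d pd sets rest else false

def gamePayoffIsSymmetric (values : List (List Int × Int)) (payoff_vector : List (Int × Int)) : Bool :=
  let d := PySem.Dict.ofList values
  let pd := PySem.Dict.ofList payoff_vector
  let sets := d.keys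
  let element := sets.filter (fun i => i.length == 1)
  pvA_outer d pd sets element

-- ===== PORT B =====
-- tuple(values[tuple(sorted(set(c) | set(m)))] for m in sets)
def pvSig (d : PySem.Dict (List Int) Int) (sets : List (List Int)) (c : List Int) :
    List (Option Int) :=
  sets.map (fun m => d.get? (pvUnion c m))

-- 'for c in sets: … rep' loop of B
def pvB_go (d : PySem.Dict (List Int) Int) (pd : PySem.Dict Int Int) (sets : List (List Int)) :
    PySem.Dict (List (Option Int)) (Option Int) → List (List Int) → Bool
  | _, [] => true
  | rep, c :: cs =>
    if c.length == 1 then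
      let s := pvSig d sets c
      let p := pd.get? (pvKey c)
      match rep.get? s with
      | some q => if q != p then false else pvB_go d pd sets rep cs
      | none => pvB_go d pd sets (rep.insert s p) cs
    else pvB_go d pd sets rep cs

def gamePayoffIsSymmetric_alt (values : List (List Int × Int)) (payoff_vector : List (Int × Int)) : Bool :=
  let d := PySem.Dict.ofList values
  let pd := PySem.Dict.ofList payoff_vector
  let sets := d.keys
  pvB_go d pd sets PySem.Dict.empty sets

-- ===== PRECONDITION & SPEC =====
-- Pre_ excludes inputs on which either Python raises KeyError: a union key
-- values[tuple(sorted(set(c)|set(m)))] or a payoff key payoff_vector[c[0]] that is missing.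
-- It is slightly narrower than where A returns: A skips the payoff lookup when the pair is
-- not symmetric and skips every lookup when it has fewer than two singletons, while B needs
-- the signature and payoff of every singleton and raises there (see claim.json cites).
def Pre_gamePayoffIsSymmetric (values : List (List Int × Int)) (payoff_vector : List (Int × Int)) : Prop :=
  let d := PySem.Dict.ofList values
  let sets := d.keys
  let element := sets.filter (fun i => i.length == 1)
  (∀ c ∈ element, ∀ m ∈ sets, d.contains (pvUnion c m) = true) ∧
  (∀ c ∈ element, (PySem.Dict.ofList payoff_vector).contains (pvKey c) = true)
instance (values : List (List Int × Int)) (payoff_vector : List (Int × Int)) : Decidable (Pre_gamePayoffIsSymmetric values payoff_vector) := by unfold Pre_gamePayoffIsSymmetric; infer_instance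

def pvWitness_gamePayoffIsSymmetric : (List (List Int × Int)) × (List (Int × Int)) :=
  ([([0], 1), ([1], 1), ([0, 1], 2)], [(0, 5), (1, 5)])

def Spec_gamePayoffIsSymmetric (values : List (List Int × Int)) (payoff_vector : List (Int × Int)) (out : Bool) : Prop := out = gamePayoffIsSymmetric_alt values payoff_vector
instance (values : List (List Int × Int)) (payoff_vector : List (Int × Int)) (out : Bool) : Decidable (Spec_gamePayoffIsSymmetric values payoff_vector out) := by unfold Spec_gamePayoffIsSymmetric; infer_instance

-- ===== CLAIM (what is proved, stated in full; the proofs are below) =====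
def Claim_equal_gamePayoffIsSymmetric : Prop := ∀ (values : List (List Int × Int)) (payoff_vector : List (Int × Int)), Dom_gamePayoffIsSymmetric values payoff_vector → Pre_gamePayoffIsSymmetric values payoff_vector → Spec_gamePayoffIsSymmetric values payoff_vector (gamePayoffIsSymmetric values payoff_vector)

-- ===== LEMMAS AND PROOFS =====

-- the symmetry relation both programs test: equal signatures force equal payoffs
def pvR (d : PySem.Dict (List Int) Int) (pd : PySem.Dict Int Int) (sets : List (List Int))
    (c1 c2 : List Int) : Prop :=
  pvSig d sets c1 = pvSig d sets c2 → pd.get? (pvKey c1) = pd.get? (pvKey c2)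

lemma pvA_badPair_eq_false_iff (d : PySem.Dict (List Int) Int) (pd : PySem.Dict Int Int)
    (sets : List (List Int)) (c1 c2 : List Int) :
    pvA_badPair d pd sets c1 c2 = false ↔ pvR d pd sets c1 c2 := by
  unfold pvA_badPair pvR pvSig
  simp [List.all_eq_true, Decidable.imp_iff_not_or]

lemma pvA_inner_iff (d : PySem.Dict (List Int) Int) (pd : PySem.Dict Int Int)
    (sets : List (List Int)) (c1 : List Int) (l : List (List Int)) :
    pvA_inner d pd sets c1 l = true ↔ ∀ c2 ∈ l, pvR d pd sets c1 c2 := by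
  induction l with
  | nil => simp [pvA_inner]
  | cons c2 rest ih =>
    simp only [pvA_inner, List.mem_cons]
    rcases Bool.eq_false_or_eq_true (pvA_badPair d pd sets c1 c2) with ht | hf
    · have hnr : ¬ pvR d pd sets c1 c2 := fun hr => by
        rw [(pvA_badPair_eq_false_iff d pd sets c1 c2).mpr hr] at ht; exact Bool.false_ne_true ht
      rw [if_pos ht]
      simp only [Bool.false_eq_true, false_iff]
      exact fun hall => hnr (hall c2 (Or.inl rfl))
    · have hr := (pvA_badPair_eq_false_iff d pd sets c1 c2).mp hf
      rw [if_neg (by simp [hf]), ih]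
      exact ⟨fun h c' hc' => hc'.elim (fun e => e ▸ hr) (h c'), fun h c' hc' => h c' (Or.inr hc')⟩

lemma pvA_outer_iff (d : PySem.Dict (List Int) Int) (pd : PySem.Dict Int Int)
    (sets : List (List Int)) (l : List (List Int)) :
    pvA_outer d pd sets l = true ↔ List.Pairwise (pvR d pd sets) l := by
  induction l with
  | nil => simp [pvA_outer]
  | cons c1 rest ih =>
    simp only [pvA_outer, List.pairwise_cons]
    by_cases h : pvA_inner d pd sets c1 rest = true
    · rw [if_pos h, ih]
      exact ⟨fun hp => ⟨(pvA_inner_iff d pd sets c1 rest).mp h, hp⟩, And.right⟩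
    · rw [if_neg h]
      simp only [Bool.false_eq_true, false_iff, not_and]
      exact fun hall _ => h ((pvA_inner_iff d pd sets c1 rest).mpr hall)

-- unfolding equations for the three branches of B's loop body
lemma pvB_go_cons_skip (d : PySem.Dict (List Int) Int) (pd : PySem.Dict Int Int)
    (sets : List (List Int)) (rep : PySem.Dict (List (Option Int)) (Option Int))
    (c : List Int) (cs : List (List Int)) (hc : ¬ c.length = 1) :
    pvB_go d pd sets rep (c :: cs) = pvB_go d pd sets rep cs := by
  simp [pvB_go, hc]

lemma pvB_go_cons_some (d : PySem.Dict (List Int) Int) (pd : PySem.Dict Int Int)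
    (sets : List (List Int)) (rep : PySem.Dict (List (Option Int)) (Option Int))
    (c : List Int) (cs : List (List Int)) (q : Option Int) (hc : c.length = 1)
    (hget : rep.get? (pvSig d sets c) = some q) :
    pvB_go d pd sets rep (c :: cs) =
      if q != pd.get? (pvKey c) then false else pvB_go d pd sets rep cs := by
  simp [pvB_go, hc, hget]

lemma pvB_go_cons_none (d : PySem.Dict (List Int) Int) (pd : PySem.Dict Int Int)
    (sets : List (List Int)) (rep : PySem.Dict (List (Option Int)) (Option Int))
    (c : List Int) (cs : List (List Int)) (hc : c.length = 1)
    (hget : rep.get? (pvSig d sets c) = none) :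
    pvB_go d pd sets rep (c :: cs) =
      pvB_go d pd sets (rep.insert (pvSig d sets c) (pd.get? (pvKey c))) cs := by
  simp [pvB_go, hc, hget]

-- B's loop returns True iff rep agrees with every pending singleton's payoff and the
-- pending singletons are pairwise symmetric-consistent
lemma pvB_go_iff (d : PySem.Dict (List Int) Int) (pd : PySem.Dict Int Int)
    (sets : List (List Int)) (l : List (List Int))
    (rep : PySem.Dict (List (Option Int)) (Option Int)) :
    pvB_go d pd sets rep l = true ↔
      ((∀ c ∈ l.filter (fun i => i.length == 1), ∀ v,
          rep.get? (pvSig d sets c) = some v → v = pd.get? (pvKey c)) ∧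
       List.Pairwise (pvR d pd sets) (l.filter (fun i => i.length == 1))) := by
  induction l generalizing rep with
  | nil => simp [pvB_go]
  | cons c cs ih =>
    by_cases hc : c.length = 1
    · have hfil : (c :: cs).filter (fun i => i.length == 1) =
        c :: cs.filter (fun i => i.length == 1) := by simp [hc]
      rw [hfil]
      cases hget : rep.get? (pvSig d sets c) with
      | some q =>
        rw [pvB_go_cons_some d pd sets rep c cs q hc hget]
        by_cases hq : q = pd.get? (pvKey c)
        · rw [if_neg (by simp [hq]), ih rep]
          constructor
          · rintro ⟨h1, h2⟩
            refine ⟨?_, List.pairwise_cons.mpr ⟨?_, h2⟩⟩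
            · intro c' hc' v hv
              rcases List.mem_cons.mp hc' with rfl | hm
              · rw [hget] at hv; injection hv with hv; rw [← hv, hq]
              · exact h1 c' hm v hv
            · intro c' hm hs
              have := h1 c' hm q (by rw [← hs, hget])
              rw [← this, hq]
          · rintro ⟨h1, h2⟩
            exact ⟨fun c' hm => h1 c' (List.mem_cons_of_mem _ hm),
              (List.pairwise_cons.mp h2).2⟩
        · rw [if_pos (by simpa using hq)]
          simp only [Bool.false_eq_true, false_iff, not_and]
          intro h1 _
          exact hq (h1 c (List.mem_cons.mpr (Or.inl rfl)) q hget)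
      | none =>
        rw [pvB_go_cons_none d pd sets rep c cs hc hget, ih]
        constructor
        · rintro ⟨h1, h2⟩
          refine ⟨?_, List.pairwise_cons.mpr ⟨?_, h2⟩⟩
          · intro c' hc' v hv
            rcases List.mem_cons.mp hc' with rfl | hm
            · rw [hget] at hv; cases hv
            · have h' := h1 c' hm v
              rw [PySem.Dict.get?_insert] at h'
              by_cases hs : pvSig d sets c' = pvSig d sets c
              · exact absurd (hs ▸ hv) (by simp [hget])
              · exact h' (by rwa [if_neg hs])
          · intro c' hm hs
            have h' := h1 c' hm (pd.get? (pvKey c))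
            rw [PySem.Dict.get?_insert, if_pos hs.symm] at h'
            exact h' rfl
        · rintro ⟨h1, h2⟩
          obtain ⟨hr, h2'⟩ := List.pairwise_cons.mp h2
          refine ⟨?_, h2'⟩
          intro c' hm v hv
          rw [PySem.Dict.get?_insert] at hv
          by_cases hs : pvSig d sets c' = pvSig d sets c
          · rw [if_pos hs] at hv
            injection hv with hv
            rw [← hv]
            exact hr c' hm hs.symm
          · rw [if_neg hs] at hv
            exact h1 c' (List.mem_cons_of_mem _ hm) v hv
    · have hfil : (c :: cs).filter (fun i => i.length == 1) =
        cs.filter (fun i => i.length == 1) := by simp [hc]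
      rw [hfil, pvB_go_cons_skip d pd sets rep c cs hc, ih]

lemma ports_agree (values : List (List Int × Int)) (payoff_vector : List (Int × Int)) :
    gamePayoffIsSymmetric values payoff_vector = gamePayoffIsSymmetric_alt values payoff_vector := by
  unfold gamePayoffIsSymmetric gamePayoffIsSymmetric_alt
  rw [Bool.eq_iff_iff, pvA_outer_iff, pvB_go_iff]
  simp [PySem.Dict.get?_empty]

-- ===== VERDICT (by name: the statement is the Claim_ definition above) =====
theorem gamePayoffIsSymmetric_spec : Claim_equal_gamePayoffIsSymmetric := by
  intro values payoff_vector _ _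
  unfold Spec_gamePayoffIsSymmetric
  exact ports_agree values payoff_vector
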